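-- pv_equiv track=rewrite | github.com/wajahattt-dev/AI-Research-Analysis-System | agents/report_writer_agent.py | _format_comparison_analysis
-- ===== SOURCE A (Python) =====
-- from typing import Dict, List, Any
--
-- def _format_comparison_analysis(comparison: Dict[str, Any]) -> str:
--     """Format comparison analysis for the report."""
--     analysis = ""
--
--     # Agreements
--     agreements = comparison.get("agreements", [])
--     if agreements:
--         analysis += "**Areas of Agreement:**\n"
--         for agreement in agreements:
--             analysis += f"- {agreement}\n"
--         analysis += "\n"
--
--     # Disagreements
--     disagreements = comparison.get("disagreements", [])
--     if disagreements:
--         analysis += "**Areas of Disagreement:**\n"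
--         for disagreement in disagreements:
--             analysis += f"- {disagreement}\n"
--         analysis += "\n"
--
--     # Biases
--     biases = comparison.get("noteworthy_biases", [])
--     if biases:
--         analysis += "**Notable Biases and Limitations:**\n"
--         for bias in biases:
--             analysis += f"- {bias}\n"
--         analysis += "\n"
--
--     # Gaps
--     gaps = comparison.get("gaps_in_knowledge", [])
--     if gaps:
--         analysis += "**Research Gaps:**\n"
--         for gap in gaps:
--             analysis += f"- {gap}\n"
--         analysis += "\n"
--
--     return analysis
-- ===== SOURCE B (Python) =====
-- def _format_comparison_analysis(comparison):
--     """Format comparison analysis for the report."""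
--     RANK = {"agreements": 0, "disagreements": 1,
--             "noteworthy_biases": 2, "gaps_in_knowledge": 3}
--     HEADER = ["**Areas of Agreement:**", "**Areas of Disagreement:**",
--               "**Notable Biases and Limitations:**", "**Research Gaps:**"]
--     slots = ["", "", "", ""]
--     for key, items in comparison.items():
--         r = RANK.get(key)
--         if r is not None and items:
--             slots[r] = HEADER[r] + "\n" + "".join(f"- {item}\n" for item in items) + "\n"
--     return "".join(slots)
-- ===== Notes on version B (the rewrite author's own statement) =====
-- stated objective: alternative
-- what changed: A makes four sequential dict.get lookups, one hard-coded block per section, appending to one growing string; B instead makes a single pass over the dict's items, dispatching each recognized non-empty section into a fixed rank-indexed slot table, and concatenates the four slots at the end.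
import Mathlib
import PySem

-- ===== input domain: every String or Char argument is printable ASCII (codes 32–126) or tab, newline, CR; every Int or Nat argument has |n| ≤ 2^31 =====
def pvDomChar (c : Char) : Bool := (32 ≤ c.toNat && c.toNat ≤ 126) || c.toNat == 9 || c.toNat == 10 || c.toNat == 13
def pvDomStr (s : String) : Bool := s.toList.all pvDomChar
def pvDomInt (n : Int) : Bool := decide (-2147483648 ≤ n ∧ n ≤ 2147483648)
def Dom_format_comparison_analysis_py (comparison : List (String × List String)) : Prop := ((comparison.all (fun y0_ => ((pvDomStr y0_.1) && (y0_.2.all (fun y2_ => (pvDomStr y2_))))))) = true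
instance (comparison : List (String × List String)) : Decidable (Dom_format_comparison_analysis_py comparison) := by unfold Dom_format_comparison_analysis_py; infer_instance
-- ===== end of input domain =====

-- B replaces A's four hard-coded get-and-append section blocks by one pass over the dict's
-- items dispatched into a rank-indexed slot table concatenated at the end; objective: alternative.


-- shared primitive: Python dict lookup on an association list (first match)
def pvLookup {α : Type} : List (String × α) → String → Option α
  | [], _ => none
  | (k', v) :: rest, k => if k' = k then some v else pvLookup rest k

-- ===== PORT A =====
-- comparison.get(key, [])
def pvGet (d : List (String × List String)) (k : String) : List String :=
  (pvLookup d k).getD []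

-- literal transliteration: four sequential section blocks, each appending to `analysis`
def format_comparison_analysis_py (comparison : List (String × List String)) : String :=
  let analysis := ""
  -- Agreements
  let agreements := pvGet comparison "agreements"
  let analysis :=
    if agreements.isEmpty then analysis
    else (agreements.foldl (fun a x => a ++ ("- " ++ x ++ "\n"))
            (analysis ++ "**Areas of Agreement:**\n")) ++ "\n"
  -- Disagreements
  let disagreements := pvGet comparison "disagreements"
  let analysis :=
    if disagreements.isEmpty then analysis
    else (disagreements.foldl (fun a x => a ++ ("- " ++ x ++ "\n"))
            (analysis ++ "**Areas of Disagreement:**\n")) ++ "\n"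
  -- Biases
  let biases := pvGet comparison "noteworthy_biases"
  let analysis :=
    if biases.isEmpty then analysis
    else (biases.foldl (fun a x => a ++ ("- " ++ x ++ "\n"))
            (analysis ++ "**Notable Biases and Limitations:**\n")) ++ "\n"
  -- Gaps
  let gaps := pvGet comparison "gaps_in_knowledge"
  let analysis :=
    if gaps.isEmpty then analysis
    else (gaps.foldl (fun a x => a ++ ("- " ++ x ++ "\n"))
            (analysis ++ "**Research Gaps:**\n")) ++ "\n"
  analysis

-- ===== PORT B =====
-- "".join(list of strings); exact for Python's empty-separator join
def pvCat (l : List String) : String := l.foldr (· ++ ·) ""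

-- RANK.get(key): lookup in the literal rank dict
def pvRank (k : String) : Option Nat :=
  pvLookup [("agreements", 0), ("disagreements", 1),
            ("noteworthy_biases", 2), ("gaps_in_knowledge", 3)] k

-- the HEADER list
def pvHeader : List String :=
  ["**Areas of Agreement:**", "**Areas of Disagreement:**",
   "**Notable Biases and Limitations:**", "**Research Gaps:**"]

-- the loop body of B: dispatch one (key, items) pair into its slot
def pvStep (slots : List String) (p : String × List String) : List String :=
  match pvRank p.1 with
  | none => slots
  | some r =>
    if p.2.isEmpty then slots
    else slots.set r (pvHeader.getD r "" ++ "\n"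
          ++ pvCat (p.2.map (fun it => "- " ++ it ++ "\n")) ++ "\n")

-- comparison.items(): pairs of the dict, one per key (first occurrence; a Python dict has unique keys)
def pvItems : List (String × List String) → List (String × List String)
  | [] => []
  | (k, v) :: rest => (k, v) :: pvItems (rest.filter (fun p => decide (p.1 ≠ k)))
termination_by l => l.length
decreasing_by
  simp only [List.length_unattach, List.length_cons]
  exact Nat.lt_succ_of_le (le_trans (List.length_filter_le _ _) (by simp))

def format_comparison_analysis_py_alt (comparison : List (String × List String)) : String :=
  pvCat ((pvItems comparison).foldl pvStep ["", "", "", ""])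

-- ===== PRECONDITION & SPEC =====
def Spec_format_comparison_analysis_py (comparison : List (String × List String)) (out : String) : Prop := out = format_comparison_analysis_py_alt comparison
instance (comparison : List (String × List String)) (out : String) : Decidable (Spec_format_comparison_analysis_py comparison out) := by unfold Spec_format_comparison_analysis_py; infer_instance

-- ===== CLAIM (what is proved, stated in full; the proofs are below) =====
def Claim_equal_format_comparison_analysis_py : Prop := ∀ (comparison : List (String × List String)), Dom_format_comparison_analysis_py comparison → Spec_format_comparison_analysis_py comparison (format_comparison_analysis_py comparison)

-- ===== LEMMAS AND PROOFS =====

-- proof-side: rank r back to its key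
def pvKey (r : Nat) : String :=
  ["agreements", "disagreements", "noteworthy_biases", "gaps_in_knowledge"].getD r ""

-- proof-side: the section text for rank r (the common closed form of both ports)
def pvSec (comparison : List (String × List String)) (r : Nat) : String :=
  match pvLookup comparison (pvKey r) with
  | none => ""
  | some v =>
    if v.isEmpty then ""
    else pvHeader.getD r "" ++ "\n"
          ++ pvCat (v.map (fun it => "- " ++ it ++ "\n")) ++ "\n"

theorem pvRank_eq_some {k : String} {r : Nat} (h : pvRank k = some r) :
    k = pvKey r ∧ r < 4 := by
  simp only [pvRank, pvLookup] at h
  split_ifs at h with h1 h2 h3 h4 <;> simp_all [pvKey, eq_comm]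

theorem pvRank_pvKey {r : Nat} (h : r < 4) : pvRank (pvKey r) = some r := by
  interval_cases r <;> rfl

theorem pvKey_inj {r r' : Nat} (hr : r < 4) (hr' : r' < 4) (hne : r ≠ r') :
    pvKey r ≠ pvKey r' := by
  interval_cases r <;> interval_cases r' <;> simp_all [pvKey]

theorem pvLookup_filter_ne {α : Type} (l : List (String × α)) (k0 k : String) (h : k ≠ k0) :
    pvLookup (l.filter (fun p => decide (p.1 ≠ k0))) k = pvLookup l k := by
  induction l with
  | nil => rfl
  | cons a rest ih =>
    obtain ⟨ka, va⟩ := a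
    rw [List.filter_cons]
    by_cases hk : ka = k0
    · subst hk
      rw [if_neg (by simp), ih]
      simp [pvLookup, Ne.symm h]
    · rw [if_pos (by simp [hk])]
      show (if ka = k then some va else pvLookup (rest.filter fun p => decide (p.1 ≠ k0)) k)
            = pvLookup ((ka, va) :: rest) k
      by_cases hkk : ka = k
      · simp [pvLookup, hkk]
      · rw [if_neg hkk, ih]
        simp [pvLookup, hkk]

theorem mem_pvItems_aux (n : Nat) : ∀ (l : List (String × List String))
    (p : String × List String), l.length ≤ n → p ∈ pvItems l → p ∈ l := by
  induction n with
  | zero =>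
    intro l p hl hp
    cases l with
    | nil => simp [pvItems] at hp
    | cons a rest => simp at hl
  | succ n ih =>
    intro l p hl hp
    match l with
    | [] => simp [pvItems] at hp
    | (k, v) :: rest =>
      rw [pvItems] at hp
      rcases List.mem_cons.mp hp with h1 | h1
      · simp [h1]
      · have hlen : (rest.filter (fun p => decide (p.1 ≠ k))).length ≤ n :=
          le_trans (List.length_filter_le _ _) (by simp at hl; omega)
        exact List.mem_cons_of_mem _ (List.mem_of_mem_filter (ih _ p hlen h1))

theorem mem_pvItems {p : String × List String} {l : List (String × List String)}
    (h : p ∈ pvItems l) : p ∈ l :=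
  mem_pvItems_aux l.length l p le_rfl h

theorem pvLookup_pvItems_aux (n : Nat) : ∀ (l : List (String × List String)) (k : String),
    l.length ≤ n → pvLookup (pvItems l) k = pvLookup l k := by
  induction n with
  | zero =>
    intro l k hl
    cases l with
    | nil => simp [pvItems]
    | cons a rest => simp at hl
  | succ n ih =>
    intro l k hl
    match l with
    | [] => simp [pvItems]
    | (k0, v) :: rest =>
      rw [pvItems]
      by_cases hk : k0 = k
      · simp [pvLookup, hk]
      · simp only [pvLookup, hk, if_false]
        have hlen : (rest.filter (fun p => decide (p.1 ≠ k0))).length ≤ n :=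
          le_trans (List.length_filter_le _ _) (by simp at hl; omega)
        rw [ih _ k hlen, pvLookup_filter_ne _ _ _ (fun h => hk h.symm)]

theorem pvLookup_pvItems (l : List (String × List String)) (k : String) :
    pvLookup (pvItems l) k = pvLookup l k :=
  pvLookup_pvItems_aux l.length l k le_rfl

theorem nodup_keys_pvItems_aux (n : Nat) : ∀ (l : List (String × List String)),
    l.length ≤ n → ((pvItems l).map Prod.fst).Nodup := by
  induction n with
  | zero =>
    intro l hl
    cases l with
    | nil => simp [pvItems]
    | cons a rest => simp at hl
  | succ n ih =>
    intro l hl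
    match l with
    | [] => simp [pvItems]
    | (k0, v) :: rest =>
      rw [pvItems]
      simp only [List.map_cons, List.nodup_cons]
      have hlen : (rest.filter (fun p => decide (p.1 ≠ k0))).length ≤ n :=
        le_trans (List.length_filter_le _ _) (by simp at hl; omega)
      refine ⟨?_, ih _ hlen⟩
      intro hmem
      rcases List.mem_map.mp hmem with ⟨p, hp, hfst⟩
      have := List.of_mem_filter (mem_pvItems hp)
      rw [hfst] at this
      simp at this

theorem nodup_keys_pvItems (l : List (String × List String)) :
    ((pvItems l).map Prod.fst).Nodup :=
  nodup_keys_pvItems_aux l.length l le_rfl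

theorem pvLookup_eq_none_of_not_mem {α : Type} {l : List (String × α)} {k : String}
    (h : k ∉ l.map Prod.fst) : pvLookup l k = none := by
  induction l with
  | nil => rfl
  | cons a rest ih =>
    obtain ⟨ka, va⟩ := a
    simp only [List.map_cons, List.mem_cons] at h
    have h1 : ¬ ka = k := fun he => h (Or.inl he.symm)
    have h2 : k ∉ rest.map Prod.fst := fun hm => h (Or.inr hm)
    simp only [pvLookup, h1, if_false]
    exact ih h2

theorem length_pvStep (slots : List String) (p : String × List String) :
    (pvStep slots p).length = slots.length := by
  unfold pvStep
  split
  · rfl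
  · split <;> simp

theorem length_foldl_pvStep (d : List (String × List String)) (slots : List String) :
    (d.foldl pvStep slots).length = slots.length := by
  induction d generalizing slots with
  | nil => rfl
  | cons p rest ih =>
    rw [List.foldl_cons, ih, length_pvStep]

theorem foldl_pvStep_getD (d : List (String × List String)) (slots : List String) (r : Nat)
    (hnd : (d.map Prod.fst).Nodup) (hr4 : r < 4) (hrl : r < slots.length) :
    (d.foldl pvStep slots)[r]?.getD "" =
      match pvLookup d (pvKey r) with
      | none => slots[r]?.getD ""
      | some v =>
        if v.isEmpty then slots[r]?.getD ""
        else pvHeader.getD r "" ++ "\n"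
              ++ pvCat (v.map (fun it => "- " ++ it ++ "\n")) ++ "\n" := by
  induction d generalizing slots with
  | nil => rfl
  | cons p rest ih =>
    obtain ⟨k, v⟩ := p
    simp only [List.map_cons, List.nodup_cons] at hnd
    obtain ⟨hknotin, hndrest⟩ := hnd
    rw [List.foldl_cons]
    have hlen : r < (pvStep slots (k, v)).length := by
      rw [length_pvStep]; exact hrl
    rw [ih _ hndrest hlen]
    cases hR : pvRank k with
    | none =>
      have hkne : k ≠ pvKey r := by
        intro he; rw [he, pvRank_pvKey hr4] at hR; simp at hR
      have hstep : pvStep slots (k, v) = slots := by unfold pvStep; rw [hR]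
      rw [hstep]
      show _ = (match (if k = pvKey r then some v else pvLookup rest (pvKey r)) with
        | none => slots[r]?.getD ""
        | some v =>
          if v.isEmpty then slots[r]?.getD ""
          else pvHeader.getD r "" ++ "\n"
                ++ pvCat (v.map (fun it => "- " ++ it ++ "\n")) ++ "\n" : String)
      rw [if_neg hkne]
    | some r' =>
      obtain ⟨hkey, hr'4⟩ := pvRank_eq_some hR
      by_cases hrr : r' = r
      · subst hrr
        have hlook : pvLookup ((k, v) :: rest) (pvKey r') = some v := by
          simp [pvLookup, hkey]
        have hnone : pvLookup rest (pvKey r') = none := by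
          rw [← hkey]; exact pvLookup_eq_none_of_not_mem hknotin
        rw [hlook, hnone]
        have hstep : pvStep slots (k, v) =
            if v.isEmpty then slots
            else slots.set r' (pvHeader.getD r' "" ++ "\n"
              ++ pvCat (v.map (fun it => "- " ++ it ++ "\n")) ++ "\n") := by
          unfold pvStep; rw [hR]
        rw [hstep]
        by_cases hv : v.isEmpty
        · simp [hv]
        · simp [hv, hrl]
      · have hkne : k ≠ pvKey r := by
          rw [hkey]; exact pvKey_inj hr'4 hr4 hrr
        have hlook : pvLookup ((k, v) :: rest) (pvKey r) = pvLookup rest (pvKey r) := by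
          simp [pvLookup, hkne]
        rw [hlook]
        have hget : (pvStep slots (k, v))[r]? = slots[r]? := by
          unfold pvStep
          rw [hR]
          dsimp only
          by_cases hv : v.isEmpty
          · rw [if_pos hv]
          · rw [if_neg hv]
            exact List.getElem?_set_ne (fun h => hrr h)
        rw [hget]

theorem pvCat_four (l : List String) (h : l.length = 4) :
    pvCat l = l[0]?.getD "" ++ (l[1]?.getD "" ++ (l[2]?.getD "" ++ l[3]?.getD "")) := by
  match l, h with
  | [a, b, c, d], _ => simp [pvCat]

theorem alt_eq_sec (c : List (String × List String)) :
    format_comparison_analysis_py_alt c =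
      pvSec c 0 ++ (pvSec c 1 ++ (pvSec c 2 ++ pvSec c 3)) := by
  unfold format_comparison_analysis_py_alt
  have hlen : ((pvItems c).foldl pvStep ["", "", "", ""]).length = 4 :=
    length_foldl_pvStep _ _
  rw [pvCat_four _ hlen]
  have hr : ∀ r : Nat, r < 4 →
      ((pvItems c).foldl pvStep ["", "", "", ""])[r]?.getD "" = pvSec c r := by
    intro r hr4
    rw [foldl_pvStep_getD _ _ _ (nodup_keys_pvItems c) hr4 (by simp; omega),
        pvLookup_pvItems]
    unfold pvSec
    cases pvLookup c (pvKey r) with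
    | none => interval_cases r <;> rfl
    | some v =>
      by_cases hv : v.isEmpty
      · simp only [hv, if_true]; interval_cases r <;> rfl
      · simp [hv]
  rw [hr 0 (by omega), hr 1 (by omega), hr 2 (by omega), hr 3 (by omega)]

-- A's inner loop over a section's items equals acc ++ the joined "- item\n" lines.
theorem foldl_dash_eq_cat (s : List String) (acc : String) :
    s.foldl (fun a x => a ++ ("- " ++ x ++ "\n")) acc
      = acc ++ pvCat (s.map (fun x => "- " ++ x ++ "\n")) := by
  induction s generalizing acc with
  | nil => simp [pvCat]
  | cons h t ih => simp [pvCat, String.append_assoc] at *; simp [ih, String.append_assoc]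

theorem pvSec_eq_ite (c : List (String × List String)) (r : Nat) :
    pvSec c r =
      if (pvGet c (pvKey r)).isEmpty then ""
      else pvHeader.getD r "" ++ "\n"
            ++ pvCat ((pvGet c (pvKey r)).map (fun it => "- " ++ it ++ "\n")) ++ "\n" := by
  unfold pvSec pvGet
  cases pvLookup c (pvKey r) <;> simp

theorem a_eq_sec (c : List (String × List String)) :
    format_comparison_analysis_py c =
      pvSec c 0 ++ (pvSec c 1 ++ (pvSec c 2 ++ pvSec c 3)) := by
  unfold format_comparison_analysis_py
  rw [pvSec_eq_ite c 0, pvSec_eq_ite c 1, pvSec_eq_ite c 2, pvSec_eq_ite c 3]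
  simp only [show pvKey 0 = "agreements" from rfl, show pvKey 1 = "disagreements" from rfl,
    show pvKey 2 = "noteworthy_biases" from rfl, show pvKey 3 = "gaps_in_knowledge" from rfl]
  simp only [foldl_dash_eq_cat]
  show (let analysis := ""; _) = _
  split_ifs <;>
    · apply String.toList_inj.mp
      simp [pvHeader, pvCat, String.append_assoc]

-- ===== VERDICT (by name: the statement is the Claim_ definition above) =====
theorem format_comparison_analysis_py_spec : Claim_equal_format_comparison_analysis_py := by
  intro comparison _
  unfold Spec_format_comparison_analysis_py
  rw [a_eq_sec, alt_eq_sec]
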